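-- pv_equiv track=rewrite | github.com/daniel-reich/ubiquitous-fiesta | vuSXW3iEnEQNZXjAP_15.py | create_square
-- ===== SOURCE A (Python) =====
-- def create_square(length):
--   if type(length) != int:
--     return ""
--   arr = []
--   for i in range(length):
--     if i == 0:
--       arr.append('#'*length)
--     elif i == length-1:
--       arr.append('\n' + '#'*length)
--     else : arr.append('\n'+'#' + ' '*(length-2) + '#')
--   return "".join(arr)
-- ===== SOURCE B (Python) =====
-- def create_square(length):
--   if type(length) != int:
--     return ""
--   if length <= 0:
--     return ""
--   if length == 1:
--     return "#"
--   full = '#' * length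
--   middle = ('\n#' + ' ' * (length - 2) + '#') * (length - 2)
--   return "".join((full, middle, '\n', full))
-- ===== Notes on version B (the rewrite author's own statement) =====
-- stated objective: simpler
-- what changed: B is loop-free closed-form string arithmetic: the top row, the newline-prefixed middle row repeated (n-2) times by string multiplication, a newline and the bottom row, assembled in one join of those four pieces, replacing A's per-index loop that classifies each row number and accumulates row strings in a list.
import Mathlib
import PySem

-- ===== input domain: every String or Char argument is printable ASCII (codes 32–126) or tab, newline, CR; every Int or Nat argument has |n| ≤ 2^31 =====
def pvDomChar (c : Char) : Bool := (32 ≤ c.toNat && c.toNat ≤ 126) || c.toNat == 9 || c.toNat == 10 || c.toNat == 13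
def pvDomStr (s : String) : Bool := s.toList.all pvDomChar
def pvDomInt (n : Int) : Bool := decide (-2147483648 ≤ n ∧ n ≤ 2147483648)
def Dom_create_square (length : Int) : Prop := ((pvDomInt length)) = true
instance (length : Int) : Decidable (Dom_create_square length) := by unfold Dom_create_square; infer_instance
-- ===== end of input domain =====

-- B is a loop-free closed-form string expression (top row + repeated middle block + bottom row);
-- A loops over row indices, classifies each, and joins accumulated rows. Equal on all Int inputs.
-- Python str * n is ported as List.replicate n.toNat (toNat clamps negatives to 0, exactly Python's rule).
def pyRepChar (c : Char) (n : Int) : List Char := List.replicate n.toNat c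

-- ===== PORT A =====
def create_square (length : Int) : String :=
  String.ofList (PySem.Chars.join []
    ((PySem.List.pyRange 0 length 1).foldl (fun arr i =>
      if i = 0 then arr ++ [pyRepChar '#' length]
      else if i = length - 1 then arr ++ [['\n'] ++ pyRepChar '#' length]
      else arr ++ [['\n', '#'] ++ pyRepChar ' ' (length - 2) ++ ['#']]) []))

-- ===== PORT B =====
-- Source B's string multiplication block * (length-2) is ported as (List.replicate (length-2).toNat block).flatten
def create_square_alt (length : Int) : String :=
  if length ≤ 0 then ""
  else if length = 1 then "#"
  else
    String.ofList (pyRepChar '#' length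
      ++ (List.replicate (length - 2).toNat (['\n', '#'] ++ pyRepChar ' ' (length - 2) ++ ['#'])).flatten
      ++ ['\n'] ++ pyRepChar '#' length)

-- ===== PRECONDITION & SPEC =====
def Spec_create_square (length : Int) (out : String) : Prop := out = create_square_alt length
instance (length : Int) (out : String) : Decidable (Spec_create_square length out) := by unfold Spec_create_square; infer_instance

-- ===== CLAIM (what is proved, stated in full; the proofs are below) =====
def Claim_equal_create_square : Prop := ∀ (length : Int), Dom_create_square length → Spec_create_square length (create_square length)

-- ===== LEMMAS AND PROOFS =====

lemma join_nil_eq_flatten (ys : List (List Char)) : PySem.Chars.join [] ys = ys.flatten := by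
  induction ys with
  | nil => simp [PySem.Chars.join_nil]
  | cons y ys ih =>
    cases ys with
    | nil => simp [PySem.Chars.join_singleton]
    | cons z zs =>
      rw [PySem.Chars.join_cons_cons] at *
      simp [ih]

lemma map_const_pyRange (a b : Int) (c : List Char) :
    (PySem.List.pyRange a b 1).map (fun _ => c) = List.replicate (b - a).toNat c := by
  rw [PySem.List.pyRange_one]
  simp [List.map_map, List.eq_replicate_iff]

-- the characterisation of A's accumulated row list (k = middle-row count, n = k + 2)
lemma create_square_arr (k : Nat) (n : Int) (hn : n = (k : Int) + 2) :
    (PySem.List.pyRange 0 n 1).foldl (fun arr i =>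
      if i = 0 then arr ++ [pyRepChar '#' n]
      else if i = n - 1 then arr ++ [['\n'] ++ pyRepChar '#' n]
      else arr ++ [['\n', '#'] ++ pyRepChar ' ' (n - 2) ++ ['#']]) []
    = [pyRepChar '#' n]
      ++ List.replicate k (['\n', '#'] ++ pyRepChar ' ' (n - 2) ++ ['#'])
      ++ [['\n'] ++ pyRepChar '#' n] := by
  have hfun : (fun (arr : List (List Char)) (i : Int) =>
      if i = 0 then arr ++ [pyRepChar '#' n]
      else if i = n - 1 then arr ++ [['\n'] ++ pyRepChar '#' n]
      else arr ++ [['\n', '#'] ++ pyRepChar ' ' (n - 2) ++ ['#']])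
      = (fun arr i => arr ++ [if i = 0 then pyRepChar '#' n
          else if i = n - 1 then ['\n'] ++ pyRepChar '#' n
          else ['\n', '#'] ++ pyRepChar ' ' (n - 2) ++ ['#']]) := by
    funext arr i; split_ifs <;> rfl
  rw [hfun, PySem.List.foldl_append_singleton_eq_map]
  have hsplit : PySem.List.pyRange 0 n 1
      = PySem.List.pyRange 0 1 1 ++ PySem.List.pyRange 1 (n - 1) 1 ++ PySem.List.pyRange (n - 1) n 1 := by
    rw [PySem.List.pyRange_one_append 0 (n - 1) n (by omega) (by omega),
        PySem.List.pyRange_one_append 0 1 (n - 1) (by omega) (by omega)]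
  rw [hsplit]
  have h1 : PySem.List.pyRange 0 1 1 = [0] := PySem.List.pyRange_one_singleton 0
  have h2 : PySem.List.pyRange (n - 1) n 1 = [n - 1] := by
    have := PySem.List.pyRange_one_singleton (n - 1)
    simpa [show n - 1 + 1 = n by ring] using this
  rw [h1, h2]
  simp only [List.map_append, List.map_cons, List.map_nil]
  have hmid : (PySem.List.pyRange 1 (n - 1) 1).map (fun i =>
      if i = 0 then pyRepChar '#' n
      else if i = n - 1 then ['\n'] ++ pyRepChar '#' n
      else ['\n', '#'] ++ pyRepChar ' ' (n - 2) ++ ['#'])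
      = List.replicate k (['\n', '#'] ++ pyRepChar ' ' (n - 2) ++ ['#']) := by
    have hconst : ∀ i ∈ PySem.List.pyRange 1 (n - 1) 1,
        (if i = 0 then pyRepChar '#' n
         else if i = n - 1 then ['\n'] ++ pyRepChar '#' n
         else ['\n', '#'] ++ pyRepChar ' ' (n - 2) ++ ['#'])
        = ['\n', '#'] ++ pyRepChar ' ' (n - 2) ++ ['#'] := by
      intro i hi
      rw [PySem.List.mem_pyRange_one] at hi
      rw [if_neg (by omega), if_neg (by omega)]
    rw [List.map_congr_left hconst, map_const_pyRange]
    congr 1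
    omega
  rw [hmid]
  simp [show ¬(n - 1 = 0) by omega]

-- ===== VERDICT (by name: the statement is the Claim_ definition above) =====
theorem create_square_spec : Claim_equal_create_square := by
  intro n _
  unfold Spec_create_square create_square create_square_alt
  by_cases h0 : n ≤ 0
  · rw [if_pos h0, PySem.List.pyRange_one_eq_nil h0]
    simp [PySem.Chars.join_nil]
  · rw [if_neg h0]
    by_cases h1 : n = 1
    · subst h1; decide
    · rw [if_neg h1]
      obtain ⟨k, hk⟩ : ∃ k : Nat, n = (k : Int) + 2 := ⟨(n - 2).toNat, by omega⟩
      rw [create_square_arr k n hk, join_nil_eq_flatten]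
      have hkk : (n - 2).toNat = k := by omega
      rw [hkk]
      simp
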